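/-
  THE SPLIT OF `vorbis_finish_frame` (141 instructions, 0x107060 … 0x1072a5; stb_vorbis_fixed.c `vorbis_finish_frame`) INTO FIVE SEGMENTS.

  The function's contract `Vorbis.Spec.vorbis_finish_frame.spec` is in Vorbis/Spec/Top.lean. This file holds
    PART 1: general lemmas of the family: `ff_inv_step` / `ff_post_tail` (the decode-time invariant `DecodeInv` over one batch of the
            function's stores), the 32-bit facts of the tail (`ff_toInt_sub32`, `ff_result_min`, …);
    PART 2: the assertions at the four cut points, all relative to the function's entry state `u`, ghost `f` = the decoder object:
            `FFrame` (what every cut point shares) ⊂ `AtMix i j n w` (0x107184 = `cut2`, the INNER head of the mixing loops),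
            `AtPrevJoin` (0x1071ae = `at_1071ae`), `AtSave i j` (0x10722c = `cut4`, the INNER head of the saving loops),
            `AtTail` (0x107257 = `at_107257`);
    PART 3: the claims `Seg1 … Seg5` of the units `vorbis_finish_frame.1 … .5`. Both two-deep loop nests are FLATTENED: one loop headed
            at the inner head with the ghosts `(i, j)`; segments 2 and 4 are ONE STEP of that loop (`(i, j) → (i, j + 1) | (i + 1, 0) |`
            the exit); the induction is the composition's (unit `vorbis_finish_frame.COMPOSITION`), over the lexicographic measure
            `(channels − i, n − j)` resp. `(channels − i, len − right − j)`, which the assertions' fields `i_lt`, `j_le` bound.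

  The stack frame (steady `rsp` = entry `rsp − 88`: six pushes and `sub rsp, 28H`), offsets from the ENTRY rsp:
    −88 `[rsp]` len    −84 `[rsp+4]` right    −80 `[rsp+8]` w (8 bytes)    −72 `[rsp+10H]` n, later prev, later the result
    −68 `[rsp+14H]` float scratch    −64 `[rsp+18H]` i of the mixing loops    −60 `[rsp+1CH]` left
    −48 … −8 the saved rbx rbp r12 r13 r14 r15    0 the return address.
-/
import Vorbis.Spec.Top
import Vorbis.Spec.Mdct
import Vorbis.LabelsAt

open X86 X86.User Asan Vorbis Vorbis.Spec

namespace Vorbis.Spec.vorbis_finish_frame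

/-! ### PART 1. General lemmas -/

variable {others : List Obj} {frames : List (Nat × FrameLayout)} {len : Nat} {A : Arena} {stored room : Int}
  {ysz : Nat → Nat} {mem mem' : Mem} {f : Nat}

/-- **The invariant over one batch of the function's stores**: every span is a decode-time store (`StoreOK`) that misses `*f`
except for the two fields `previous_length` `[1256, 1260)` and `samples_output` `[1788, 1792)`; no shadow byte was written; M7 is
given for the new memory. `Bits`, W1 and ADO read none of the two fields. -/
theorem ff_inv_step (h : DecodeInv others frames len A stored room ysz mem f) {spans : List Span}
    (hs : Mem.SameExcept spans mem mem')
    (hw : ∀ s, s ∈ spans → StoreOK (RunBlk A len) mem f s)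
    (hfix : ∀ s, s ∈ spans → s.hi ≤ f ∨ f + 1808 ≤ s.lo ∨ (f + 1256 ≤ s.lo ∧ s.hi ≤ f + 1260) ∨
      (f + 1788 ≤ s.lo ∧ s.hi ≤ f + 1792))
    (hun : ShadowUntouched mem mem')
    (h7 : Mdct.M7Range mem' f) : DecodeInv others frames len A stored room ysz mem' f := by
  have hbits := h.fb.vorbis.bits
  have hobr := hbits.OBR
  simp only [Vorbis.Off.sizeof.stb_vorbis] at hobr
  have hf64 : f + Off.sizeof.stb_vorbis ≤ 2 ^ 64 := by
    simp only [Vorbis.Off.sizeof.stb_vorbis]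
    omega
  -- the windows of `*f` outside the two fields read the same
  have hobj : ObjEq [(0, 1256), (1260, 1788), (1792, 1808)] mem f mem' f := by
    apply ObjEq.of_sameExcept hs
    · intro w hwm
      simp only [List.mem_cons, List.mem_nil_iff, or_false] at hwm
      rcases hwm with rfl | rfl | rfl <;> simp only [] <;> omega
    · intro w hwm s hsp
      have := hfix s hsp
      simp only [List.mem_cons, List.mem_nil_iff, or_false] at hwm
      rcases hwm with rfl | rfl | rfl <;> simp only [] <;> omega
  apply h.frame_stores hs hw
  · exact h.fb.env.eqOn hun
  · apply h.fb.ado.frame_stores hs hf64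
    · intro s hsp
      have := hfix s hsp
      omega
    · intro s hsp
      have := hfix s hsp
      omega
  · intro _
    exact hbits.transfer (hobj.sub (by decide)) ⟨hbits.OB1, hbits.OB1a⟩ hbits.OBR hbits.S2
  · intro _
    exact h7
  · intro _
    exact h.fb.vorbis.w1.transfer (hobj.sub (by decide))



/-- **The invariant and `DecodeSame` over the stores of the tail** (and of any stretch that writes only the own stack frame and
`f->samples_output`): every span lies in the stack region or in `[f + 1788, f + 1792)`. `m₀` is the entry memory, of which `*f`
reads the same except `previous_length`. -/
theorem ff_post_tail {m₀ : Mem} (h : DecodeInv others frames len A stored room ysz mem f)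
    (hobj : ObjEq [(0, 1256), (1260, 1808)] m₀ f mem f) {spans : List Span}
    (hs : Mem.SameExcept spans mem mem')
    (hsp : ∀ s, s ∈ spans → (0x700000 ≤ s.lo ∧ s.hi ≤ 0x800000) ∨ (f + 1788 ≤ s.lo ∧ s.hi ≤ f + 1792))
    (hun : ShadowUntouched mem mem') :
    DecodeInv others frames len A stored room ysz mem' f ∧ DecodeSame f m₀ mem' := by
  have hoff := h.objOff
  have hobr := h.fb.vorbis.bits.OBR
  simp only [Vorbis.Off.sizeof.stb_vorbis] at hoff hobr
  have hfix : ∀ s, s ∈ spans → s.hi ≤ f ∨ f + 1808 ≤ s.lo ∨ (f + 1256 ≤ s.lo ∧ s.hi ≤ f + 1260) ∨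
      (f + 1788 ≤ s.lo ∧ s.hi ≤ f + 1792) := by
    intro s hmem
    have := hsp s hmem
    omega
  -- `*f` outside `samples_output` reads the same
  have hstep : ObjEq [(0, 1788), (1792, 1808)] mem f mem' f := by
    apply ObjEq.of_sameExcept hs
    · intro w hwm
      simp only [List.mem_cons, List.mem_nil_iff, or_false] at hwm
      rcases hwm with rfl | rfl <;> simp only [] <;> omega
    · intro w hwm s hmem
      have := hsp s hmem
      simp only [List.mem_cons, List.mem_nil_iff, or_false] at hwm
      rcases hwm with rfl | rfl <;> simp only [] <;> omega
  constructor
  · apply ff_inv_step h hs _ hfix hun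
    · exact h.fb.vorbis.buffers.M7.transfer (hstep.sub (by decide))
    · intro s hmem
      rcases hsp s hmem with hstk | hfld
      · apply StoreOK.off
        intro B hB
        have := h.offStack B hB
        omega
      · apply StoreOK.hole
        unfold InHole
        omega
  · exact ObjEq.trans (hobj.sub (by decide)) (hstep.sub (by decide))


/-- **The invariant over a batch of stores that miss `*f` altogether** (stack spills, floats of the sample buffers: what the two loop
nests store): every span is a decode-time store (`StoreOK`) off `*f`, no shadow byte was written. `*f` reads the same, M7 with it. -/
theorem ff_inv_off (h : DecodeInv others frames len A stored room ysz mem f) {spans : List Span}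
    (hs : Mem.SameExcept spans mem mem')
    (hw : ∀ s, s ∈ spans → StoreOK (RunBlk A len) mem f s)
    (hoff : ∀ s, s ∈ spans → s.hi ≤ f ∨ f + 1808 ≤ s.lo)
    (hun : ShadowUntouched mem mem') :
    DecodeInv others frames len A stored room ysz mem' f ∧ ObjEq [(0, 1808)] mem f mem' f := by
  have hobr := h.fb.vorbis.bits.OBR
  simp only [Vorbis.Off.sizeof.stb_vorbis] at hobr
  have hobj : ObjEq [(0, 1808)] mem f mem' f := by
    apply ObjEq.of_sameExcept hs
    · intro w hwm
      simp only [List.mem_cons, List.mem_nil_iff, or_false] at hwm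
      rcases hwm with rfl
      simp only []
      omega
    · intro w hwm s hsp
      have := hoff s hsp
      simp only [List.mem_cons, List.mem_nil_iff, or_false] at hwm
      rcases hwm with rfl
      simp only []
      omega
  refine ⟨?_, hobj⟩
  apply ff_inv_step h hs hw _ hun
  · exact h.fb.vorbis.buffers.M7.transfer (hobj.sub (by decide))
  · intro s hsp
    have := hoff s hsp
    omega

/-! ### 32-bit arithmetic of the tail -/

/-- 32-bit subtraction of two `int`s `0 ≤ b ≤ a` does not wrap. -/
theorem ff_toInt_sub32 (a b : BitVec 32) (hb : 0 ≤ b.toInt) (hab : b.toInt ≤ a.toInt) :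
    (a - b).toInt = a.toInt - b.toInt := by
  have ha := BitVec.toInt_lt (x := a)
  have hb' := BitVec.toInt_lt (x := b)
  rw [BitVec.toInt_sub]
  simp only [Int.bmod_def]
  omega

/-- The walker's form of a 32-bit value that went through a stack slot. -/
theorem ff_bv32_ofNat_toNat_mod (x : BitVec 32) : BitVec.ofNat 32 (x.toNat % 4294967296) = x := by
  have := x.isLt
  rw [Nat.mod_eq_of_lt (by omega)]
  apply BitVec.eq_of_toNat_eq
  rw [BitVec.toNat_ofNat]
  omega

/-- The same without the reduction. -/
theorem ff_ofNat_toNat32 (x : BitVec 32) : BitVec.ofNat 32 x.toNat = x := by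
  have := x.isLt
  apply BitVec.eq_of_toNat_eq
  rw [BitVec.toNat_ofNat]
  omega

/-- A 32-bit pattern that reads as the `int` 0 is 0. -/
theorem ff_sint32_zero {n : Nat} (hn : n < 2 ^ 32) (h : sint32 n = 0) : n = 0 := by
  unfold sint32 at h
  split at h <;> omega

/-- A register written at 32 bits holds a number below `2 ^ 32`. -/
theorem ff_ofBV32_lt (v : BitVec 32) : (Word.ofBV v).toNat < 2 ^ 32 := by
  have h : (Word.ofBV v).toNat = (v.setWidth 64).toNat := id rfl
  rw [h, BitVec.toNat_setWidth]
  have := v.isLt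
  omega

/-- **The result of the tail** (`if (len < right) right = len; … right − left`) is `Top.FinishResult` when there was a previous
frame: `x` is eax as the walker leaves it on either arm. -/
theorem ff_result_min {b1 pl : Int} (ln lf rt x : BitVec 32) (hfp : FinishPre b1 ln.toInt lf.toInt rt.toInt) (hpl : pl ≠ 0)
    (hx : (ln.toInt < rt.toInt ∧ x = ln - lf) ∨ (¬ ln.toInt < rt.toInt ∧ x = rt - lf)) :
    Top.FinishResult pl ln.toInt lf.toInt rt.toInt x.toInt := by
  obtain ⟨h1, h2, h3, h4, h5, h6, h7⟩ := hfp
  refine ⟨fun h0 => absurd h0 hpl, Or.inr ?_⟩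
  rcases hx with ⟨hlt, rfl⟩ | ⟨hge, rfl⟩
  · rw [if_pos hlt, ff_toInt_sub32 ln lf h1 h4]
  · rw [if_neg hge, ff_toInt_sub32 rt lf h1 h3]

/-! ### The walker's forms of the loop counters `i`, `j` (32-bit registers holding small numbers) -/

/-- The low half of a register that holds the small number `k`. -/
theorem ff_part32_ofNat (k : Nat) (hk : k < 2 ^ 32) : (Word.part .w32 (UInt64.ofNat k)).toNat = k := by
  rw [Asan.part32_toNat, UInt64.toNat_ofNat']
  omega

/-- **`movsxd r64, r32` of a counter** (`movsxd r12, r14d`): the counter itself, as an `addr`. -/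
theorem ff_sext_ofNat (k : Nat) (hk : k < 2 ^ 31) :
    Word.ofBV (BitVec.signExtend 64 (Word.part .w32 (UInt64.ofNat k))) = addr k := by
  apply eq_addr
  rw [toNat_sext32 _ (by rw [ff_part32_ofNat k (by omega)]; exact hk), ff_part32_ofNat k (by omega)]

/-- The 32-bit sum `lea ebp, [r13 + rax]` of a counter and a 32-bit value, when it does not wrap: as a number. -/
theorem ff_add32_toNat (k : Nat) (x : BitVec 32) (h : x.toNat + k < 2 ^ 32) :
    (BitVec.setWidth 32 (UInt64.ofNat k + Word.ofBV x).toBitVec).toNat = x.toNat + k := by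
  rw [BitVec.toNat_setWidth, UInt64.toNat_toBitVec, UInt64.toNat_add, toNat_ofBV32, UInt64.toNat_ofNat']
  omega

/-- … and as a signed number, below `2 ^ 31`. -/
theorem ff_add32_toInt (k : Nat) (x : BitVec 32) (h : x.toNat + k < 2 ^ 31) :
    (BitVec.setWidth 32 (UInt64.ofNat k + Word.ofBV x).toBitVec).toInt = (x.toNat : Int) + k := by
  rw [BitVec.toInt_eq_toNat_cond, ff_add32_toNat k x (by omega)]
  split <;> omega

/-- **`movsxd rbp, ebp` of that sum**: the sum, as an `addr`. -/
theorem ff_sext_add32 (k : Nat) (x : BitVec 32) (h : x.toNat + k < 2 ^ 31) :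
    Word.ofBV (BitVec.signExtend 64 (BitVec.setWidth 32 (UInt64.ofNat k + Word.ofBV x).toBitVec)) = addr (x.toNat + k) := by
  apply eq_addr
  rw [toNat_sext32 _ (by rw [ff_add32_toNat k x (by omega)]; exact h), ff_add32_toNat k x (by omega)]

/-- **`add r32, 1` of a counter**: the next counter, in the form the assertions have (`UInt64.ofNat`). -/
theorem ff_inc32_ofNat (k : Nat) (hk : k + 1 < 2 ^ 32) :
    Word.ofBV (Word.part .w32 (UInt64.ofNat k) + 1#32) = UInt64.ofNat (k + 1) := by
  have e : Word.ofBV (Word.part .w32 (UInt64.ofNat k) + 1#32) = addr (k + 1) := by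
    apply eq_addr
    rw [toNat_ofBV32, BitVec.toNat_add, ff_part32_ofNat k (by omega)]
    have e1 : (1#32).toNat = 1 := by decide
    rw [e1]
    omega
  exact e

/-- … and as a signed number (the operand of the outer test `cmp [rbx + 4], r14d`). -/
theorem ff_inc32_toInt (k : Nat) (hk : k + 1 < 2 ^ 31) : (Word.part .w32 (UInt64.ofNat k) + 1#32).toInt = (k : Int) + 1 := by
  rw [BitVec.toInt_eq_toNat_cond, BitVec.toNat_add, ff_part32_ofNat k (by omega)]
  have e1 : (1#32).toNat = 1 := by decide
  rw [e1]
  simp only [Width.bits]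
  split <;> omega

/-- A small dword as a signed number (`channels`). -/
theorem ff_ofNat32_toInt (c : Nat) (h : c < 2 ^ 31) : (BitVec.ofNat 32 c).toInt = (c : Int) := by
  rw [BitVec.toInt_eq_toNat_cond, BitVec.toNat_ofNat]
  split <;> omega

/-- The address of the pointer `channel_buffers[i]` as the check at 1070D0H / 1071DFH forms it (`lea rdi, [rbx + r*8 + 368H]`). -/
theorem ff_cb_check_addr (f i : Nat) (hf : f < 2 ^ 32) (hi : i < 16) : addr f + addr i * 8 + 872 = addr (f + 872 + 8 * i) := by
  apply eq_addr
  have e8 : (8 : Word).toNat = 8 := rfl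
  have ek : (872 : Word).toNat = 872 := rfl
  rw [UInt64.toNat_add, UInt64.toNat_add, UInt64.toNat_mul, toNat_addr f (by omega), toNat_addr i (by omega), e8, ek]
  omega

/-- … and as the load forms it (`[rbx + (r + 6CH)*8 + 8]`). -/
theorem ff_cb_load_addr (f i : Nat) (hf : f < 2 ^ 32) (hi : i < 16) : addr f + (addr i + 108) * 8 + 8 = addr (f + 872 + 8 * i) := by
  apply eq_addr
  have e8 : (8 : Word).toNat = 8 := rfl
  have ek : (108 : Word).toNat = 108 := rfl
  rw [UInt64.toNat_add, UInt64.toNat_add, UInt64.toNat_mul, UInt64.toNat_add, toNat_addr f (by omega), toNat_addr i (by omega), e8, ek]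
  omega

/-- The address of the pointer `previous_window[i]` as the check at 107138H / 107200H forms it (`lea rdi, [rbx + r*8 + 468H]`). -/
theorem ff_pw_check_addr (f i : Nat) (hf : f < 2 ^ 32) (hi : i < 16) : addr f + addr i * 8 + 1128 = addr (f + 1128 + 8 * i) := by
  apply eq_addr
  have e8 : (8 : Word).toNat = 8 := rfl
  have ek : (1128 : Word).toNat = 1128 := rfl
  rw [UInt64.toNat_add, UInt64.toNat_add, UInt64.toNat_mul, toNat_addr f (by omega), toNat_addr i (by omega), e8, ek]
  omega

/-- … and as the load forms it (`[rbx + (r + 8CH)*8 + 8]`). -/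
theorem ff_pw_load_addr (f i : Nat) (hf : f < 2 ^ 32) (hi : i < 16) : addr f + (addr i + 140) * 8 + 8 = addr (f + 1128 + 8 * i) := by
  apply eq_addr
  have e8 : (8 : Word).toNat = 8 := rfl
  have ek : (140 : Word).toNat = 140 := rfl
  rw [UInt64.toNat_add, UInt64.toNat_add, UInt64.toNat_mul, UInt64.toNat_add, toNat_addr f (by omega), toNat_addr i (by omega), e8, ek]
  omega

/-- **The address of float `k` of a buffer at `p`** (`shl r, 2 ; add r, [pointer]`), when nothing wraps. -/
theorem ff_elem_addr (p k : Nat) (hp : p < 2 ^ 32) (hk : k < 2 ^ 31) : addr k <<< 2 + UInt64.ofNat p = addr (p + 4 * k) := by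
  apply eq_addr
  rw [UInt64.toNat_add, UInt64.toNat_shiftLeft, toNat_addr k (by omega), UInt64.toNat_ofNat']
  have e2 : (2 : UInt64).toNat % 64 = 2 := rfl
  rw [e2]
  omega

/-! ### PART 2. The cut-point assertions (every one is about the entry state `u` and the present state `s`) -/

/-- **What holds at every cut point after the prologue** (steady `rsp` = entry `rsp − 88`: six pushes and `sub rsp, 28H`). The function
was entered at `u` by a call (return address `ret`) with its precondition, given in its three parts for the decoder object `f`
(`rdi = f`); in the present state `s`: `rbx = f`, the text unchanged, DF / MXCSR, the return address and the six saved registers in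
their slots, the three `int` arguments spilled (`[rsp] = len`, `[rsp + 4] = right`, `[rsp + 1CH] = left`), the footprint so far (own
stack window and the arena), no shadow byte written, and `Lay.Has` of `f->previous_length` (from the first check, for the two
unchecked accesses at 1071AEH / 1071C1H). -/
structure FFrame (Lay : Layout) (others : List Obj) (frames : List (Nat × FrameLayout)) (len : Nat) (A : Arena)
    (stored room : Int) (ysz : Nat → Nat) (u₀ u : State) (ret : Word) (f : Nat) (s : State) : Prop where
  /-- the function was entered at `u` by a call -/
  entry : AtEntry (conv u₀) L.vorbis_finish_frame.entry (vorbis_finish_frame.spec others frames len A stored room ysz).frame ret u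
  /-- `rdi = f` at the entry -/
  rdi : u.reg .rdi = addr f
  /-- the precondition, part 1: the shadow layer at the entry -/
  shadow : ShadowPre others frames u
  /-- the precondition, part 2: the decode-time invariant in the ENTRY memory -/
  inv0 : DecodeInv others frames len A stored room ysz u.mem f
  /-- the precondition, part 3: W3′ about the three `int` arguments -/
  fin : FinishPre (stb_vorbis.blocksize_1 u.mem f) (s32 (u.reg .rsi)) (s32 (u.reg .rdx)) (s32 (u.reg .rcx))
  /-- the steady stack pointer -/
  rsp : s.reg .rsp = u.reg .rsp - 88
  /-- `rbx = f` (`mov rbx, rdi` at 10706EH; never written again) -/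
  rbx : s.reg .rbx = addr f
  /-- the image's text is unchanged -/
  code : CodeOK u₀ s.mem
  /-- DF = 0, the six SSE exception masks set -/
  abi : abiInv s
  /-- the return address -/
  slot_ret : UInt64.ofNat (s.mem.readLE (u.reg .rsp) 8) = ret
  /-- `push r15` -/
  slot_r15 : UInt64.ofNat (s.mem.readLE (u.reg .rsp - 8) 8) = u.reg .r15
  /-- `push r14` -/
  slot_r14 : UInt64.ofNat (s.mem.readLE (u.reg .rsp - 16) 8) = u.reg .r14
  /-- `push r13` -/
  slot_r13 : UInt64.ofNat (s.mem.readLE (u.reg .rsp - 24) 8) = u.reg .r13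
  /-- `push r12` -/
  slot_r12 : UInt64.ofNat (s.mem.readLE (u.reg .rsp - 32) 8) = u.reg .r12
  /-- `push rbp` -/
  slot_rbp : UInt64.ofNat (s.mem.readLE (u.reg .rsp - 40) 8) = u.reg .rbp
  /-- `push rbx` -/
  slot_rbx : UInt64.ofNat (s.mem.readLE (u.reg .rsp - 48) 8) = u.reg .rbx
  /-- `[rsp] = len` (`mov [rsp], esi` at 107071H; overwritten only in the tail, at 107267H) -/
  slot_len : s.mem.readLE (u.reg .rsp - 88) 4 = (Word.part .w32 (u.reg .rsi)).toNat
  /-- `[rsp + 4] = right` (`mov [rsp + 4], ecx` at 107078H) -/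
  slot_right : s.mem.readLE (u.reg .rsp - 84) 4 = (Word.part .w32 (u.reg .rcx)).toNat
  /-- `[rsp + 1CH] = left` (`mov [rsp + 1CH], edx` at 107074H) -/
  slot_left : s.mem.readLE (u.reg .rsp - 60) 4 = (Word.part .w32 (u.reg .rdx)).toNat
  /-- the footprint so far: the own 144 bytes of stack and the arena -/
  same : Mem.SameExcept [⟨(u.reg .rsp).toNat - 144, (u.reg .rsp).toNat⟩, ⟨A.B, A.B + A.L⟩] u.mem s.mem
  /-- no shadow byte was written -/
  untouched : ShadowUntouched u.mem s.mem
  /-- `f->previous_length` is in the user region (the check at 107083H) -/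
  acc_pl : Lay.Has (addr f + 1256) 4

/-- **The assertion at the join `at_1071ae`** (`prev = f->previous_length`, line 3507: reached from 107094H with
`previous_length = 0`, or from 1071A4H after the mixing loops): the invariant holds in the present memory and `*f` reads as at
the entry (the mixing loops store floats of `channel_buffers[i]` and stack slots only). All registers but rbx, rsp are dead. -/
structure AtPrevJoin (Lay : Layout) (others : List Obj) (frames : List (Nat × FrameLayout)) (len : Nat) (A : Arena)
    (stored room : Int) (ysz : Nat → Nat) (u₀ u : State) (ret : Word) (f : Nat) (s : State) : Prop where
  /-- at the join -/
  rip : s.rip = L.vorbis_finish_frame.at_1071ae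
  /-- the frame facts -/
  frame : FFrame Lay others frames len A stored room ysz u₀ u ret f s
  /-- the decode-time invariant in the present memory -/
  inv : DecodeInv others frames len A stored room ysz s.mem f
  /-- `*f` reads as at the entry -/
  obj : ObjEq [(0, 1808)] u.mem f s.mem f

/-- **The assertion at the head `cut2` = 107184H of the mixing loops, FLATTENED** (lines 3499–3504; one loop over `(i, j)`, headed at
the INNER head `cmp [rsp + 10H], r12d ; jg body`): `[rsp + 18H] = i < channels`, `r12d = j ≤ n`, `[rsp + 10H] = n` = the entry value
of `previous_length`, `[rsp + 8] = w` = the window block of `n` floats (`get_window.window_block`), `2 n ≤ b1`. The registers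
rbp r13 r14 r15 and the float scratch `[rsp + 14H]` are dead. -/
structure AtMix (Lay : Layout) (others : List Obj) (frames : List (Nat × FrameLayout)) (len : Nat) (A : Arena)
    (stored room : Int) (ysz : Nat → Nat) (u₀ u : State) (ret : Word) (f : Nat) (i j n w : Nat) (s : State) : Prop where
  /-- at the inner head -/
  rip : s.rip = L.vorbis_finish_frame.cut2
  /-- the frame facts -/
  frame : FFrame Lay others frames len A stored room ysz u₀ u ret f s
  /-- `r12d = j` (`mov r12d, 0` at 1071A6H, `add r12d, 1` at 107180H: the upper half is 0) -/
  r12 : s.reg .r12 = UInt64.ofNat j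
  /-- `[rsp + 18H] = i` -/
  slot_i : s.mem.readLE (u.reg .rsp - 64) 4 = i
  /-- `[rsp + 10H] = n` -/
  slot_n : s.mem.readLE (u.reg .rsp - 72) 4 = n
  /-- `[rsp + 8] = w` -/
  slot_w : s.mem.readLE (u.reg .rsp - 80) 8 = w
  /-- `n` is the entry value of `previous_length` -/
  n_eq : stb_vorbis.previous_length u.mem f = (n : Int)
  /-- `i < channels` (the outer test at 1071A1H) -/
  i_lt : (i : Int) < stb_vorbis.channels u.mem f
  /-- `j ≤ n` -/
  j_le : j ≤ n
  /-- `n ≤ b1 / 2` (M7) -/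
  n_le : 2 * n ≤ bsize u.mem f 1
  /-- the window returned by get_window is an allocated block of `n` floats -/
  win : RunBlk A len ⟨w, 4 * n⟩
  /-- the decode-time invariant in the present memory -/
  inv : DecodeInv others frames len A stored room ysz s.mem f
  /-- `*f` reads as at the entry -/
  obj : ObjEq [(0, 1808)] u.mem f s.mem f

/-- **The assertion at the head `cut4` = 10722CH of the saving loops, FLATTENED** (lines 3518–3520; one loop over `(i, j)`, headed at
the INNER head `lea ebp, [r13 + right] ; cmp ebp, len ; jl body`): `r14d = i < channels`, `r13d = j` with `j = 0` or `right + j ≤ len`,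
`[rsp + 10H] = prev` (the bits of the entry value of `previous_length`), `previous_length = len − right` already stored (M7 again
is part of `inv`). The registers rbp r12 r15 are dead. -/
structure AtSave (Lay : Layout) (others : List Obj) (frames : List (Nat × FrameLayout)) (len : Nat) (A : Arena)
    (stored room : Int) (ysz : Nat → Nat) (u₀ u : State) (ret : Word) (f : Nat) (i j : Nat) (s : State) : Prop where
  /-- at the inner head -/
  rip : s.rip = L.vorbis_finish_frame.cut4
  /-- the frame facts -/
  frame : FFrame Lay others frames len A stored room ysz u₀ u ret f s
  /-- `r14d = i` (`mov r14d, 0` at 1071C7H, `add r14d, 1` at 10723CH) -/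
  r14 : s.reg .r14 = UInt64.ofNat i
  /-- `r13d = j` (`mov r13d, 0` at 10724FH, `add r13d, 1` at 107228H) -/
  r13 : s.reg .r13 = UInt64.ofNat j
  /-- `i < channels` (the outer test at 107249H) -/
  i_lt : (i : Int) < stb_vorbis.channels u.mem f
  /-- `j = 0` or `right + j ≤ len` -/
  j_le : j = 0 ∨ s32 (u.reg .rcx) + j ≤ s32 (u.reg .rsi)
  /-- `[rsp + 10H] = prev` -/
  slot_prev : s.mem.readLE (u.reg .rsp - 72) 4 = u.mem.readLE (addr f + 1256) 4
  /-- the decode-time invariant in the present memory -/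
  inv : DecodeInv others frames len A stored room ysz s.mem f
  /-- `*f` reads as at the entry except `previous_length` -/
  obj : ObjEq [(0, 1256), (1260, 1808)] u.mem f s.mem f

/-- **The assertion at the exit `at_107257` of the saving loops** (`if (!prev)`, line 3522). All registers but rbx, rsp are dead. -/
structure AtTail (Lay : Layout) (others : List Obj) (frames : List (Nat × FrameLayout)) (len : Nat) (A : Arena)
    (stored room : Int) (ysz : Nat → Nat) (u₀ u : State) (ret : Word) (f : Nat) (s : State) : Prop where
  /-- at the exit of the saving loops -/
  rip : s.rip = L.vorbis_finish_frame.at_107257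
  /-- the frame facts -/
  frame : FFrame Lay others frames len A stored room ysz u₀ u ret f s
  /-- `[rsp + 10H] = prev` -/
  slot_prev : s.mem.readLE (u.reg .rsp - 72) 4 = u.mem.readLE (addr f + 1256) 4
  /-- the decode-time invariant in the present memory -/
  inv : DecodeInv others frames len A stored room ysz s.mem f
  /-- `*f` reads as at the entry except `previous_length` -/
  obj : ObjEq [(0, 1256), (1260, 1808)] u.mem f s.mem f

/-! ### PART 3. The segments -/

/-- **Segment 1, 107060H–1070BAH + 107194H–1071ACH** (lines 3484–3499: the prologue, the check and the test of `previous_length`, the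
call of get_window, `i = 0`, the first outer test `i < channels`, `j = 0`): from the function's entry with its precondition
(`f` names the number in rdi) to the head of the flattened mixing loop with `(i, j) = (0, 0)` — `n` = `previous_length`, `w` = the
window returned —, or to the join 1071AEH (`previous_length = 0`), or through 10729CH and the epilogue to the state after the `ret`
(get_window returned NULL: nothing but the own stack was written). -/
def Seg1 (Lay : Layout) (μ : Microarch) (u₀ : State) : Prop :=
  ∀ (others : List Obj) (frames : List (Nat × FrameLayout)) (len : Nat) (A : Arena) (stored room : Int) (ysz : Nat → Nat)
      (u : State) (ret : Word) (f : Nat),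
    AtEntry (conv u₀) L.vorbis_finish_frame.entry (vorbis_finish_frame.spec others frames len A stored room ysz).frame ret u →
    (vorbis_finish_frame.spec others frames len A stored room ysz).pre u →
    (u.reg .rdi).toNat = f →
    ReachVia Lay μ WayInv u (fun s =>
      (∃ n w : Nat, AtMix Lay others frames len A stored room ysz u₀ u ret f 0 0 n w s) ∨
      AtPrevJoin Lay others frames len A stored room ysz u₀ u ret f s ∨
      Returned (conv u₀) (vorbis_finish_frame.spec others frames len A stored room ysz) u ret s)

/-- **Segment 2, 107184H–10718FH + 1070BFH–107180H + 107194H–1071ACH** (lines 3499–3504): ONE STEP of the flattened mixing loop from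
its head at `(i, j)`: the body (`j < n`: 7 checks, the store of `channel_buffers[i][left + j]`) back to the head at `(i, j + 1)`; or
(`j ≥ n`) `++i` and the outer test: to the head at `(i + 1, 0)`, or to the join 1071AEH (`i + 1 ≥ channels`). -/
def Seg2 (Lay : Layout) (μ : Microarch) (u₀ : State) : Prop :=
  ∀ (others : List Obj) (frames : List (Nat × FrameLayout)) (len : Nat) (A : Arena) (stored room : Int) (ysz : Nat → Nat)
      (u : State) (ret : Word) (f i j n w : Nat) (v : State),
    AtMix Lay others frames len A stored room ysz u₀ u ret f i j n w v →
    ReachVia Lay μ WayInv v (fun s =>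
      AtMix Lay others frames len A stored room ysz u₀ u ret f i (j + 1) n w s ∨
      AtMix Lay others frames len A stored room ysz u₀ u ret f (i + 1) 0 n w s ∨
      AtPrevJoin Lay others frames len A stored room ysz u₀ u ret f s)

/-- **Segment 3, 1071AEH–1071CDH + 107240H–107255H** (lines 3507–3518: `prev = f->previous_length`, `f->previous_length = len − right`
— M7 again by `Mdct.M7Range.of_finish` —, `i = 0`, the first outer test — `channels ≥ 1`: HD1 —, `j = 0`): from the join to the head of
the flattened saving loop with `(i, j) = (0, 0)`. -/
def Seg3 (Lay : Layout) (μ : Microarch) (u₀ : State) : Prop :=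
  ∀ (others : List Obj) (frames : List (Nat × FrameLayout)) (len : Nat) (A : Arena) (stored room : Int) (ysz : Nat → Nat)
      (u : State) (ret : Word) (f : Nat) (v : State),
    AtPrevJoin Lay others frames len A stored room ysz u₀ u ret f v →
    ReachVia Lay μ WayInv v (fun s => AtSave Lay others frames len A stored room ysz u₀ u ret f 0 0 s)

/-- **Segment 4, 10722CH–10723CH + 1071CFH–107228H + 107240H–107255H** (lines 3518–3520): ONE STEP of the flattened saving loop from its
head at `(i, j)`: the body (`right + j < len`: 5 checks, the store of `previous_window[i][j]`) back to the head at `(i, j + 1)`; or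
`++i` and the outer test: to the head at `(i + 1, 0)`, or to the exit 107257H (`i + 1 ≥ channels`). -/
def Seg4 (Lay : Layout) (μ : Microarch) (u₀ : State) : Prop :=
  ∀ (others : List Obj) (frames : List (Nat × FrameLayout)) (len : Nat) (A : Arena) (stored room : Int) (ysz : Nat → Nat)
      (u : State) (ret : Word) (f i j : Nat) (v : State),
    AtSave Lay others frames len A stored room ysz u₀ u ret f i j v →
    ReachVia Lay μ WayInv v (fun s =>
      AtSave Lay others frames len A stored room ysz u₀ u ret f i (j + 1) s ∨
      AtSave Lay others frames len A stored room ysz u₀ u ret f (i + 1) 0 s ∨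
      AtTail Lay others frames len A stored room ysz u₀ u ret f s)

/-- **Segment 5, 107257H–10729BH** (lines 3522–3534: `if (!prev) return 0; if (len < right) right = len; f->samples_output += right − left;
return right − left;`, the epilogue): from the exit of the saving loops to the state after the `ret`: the contract's `Returned`. -/
def Seg5 (Lay : Layout) (μ : Microarch) (u₀ : State) : Prop :=
  ∀ (others : List Obj) (frames : List (Nat × FrameLayout)) (len : Nat) (A : Arena) (stored room : Int) (ysz : Nat → Nat)
      (u : State) (ret : Word) (f : Nat) (v : State),
    AtTail Lay others frames len A stored room ysz u₀ u ret f v →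
    ReachVia Lay μ WayInv v (Returned (conv u₀) (vorbis_finish_frame.spec others frames len A stored room ysz) u ret)

end Vorbis.Spec.vorbis_finish_frame
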